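-- pv_equiv track=rewrite | github.com/borisburd/incendio-forestal | T1-3 - Bosques-Burd-Boris-2020-02-19_18.02.54.py | propagacion
-- ===== SOURCE A (Python) =====
-- def propagacion(l):
--     for i in range(len(l)-1):
--         if l[i]==-1:
--             if l[i+1]!=0:
--                 l[i+1]=-1
--     for i in range(len(l)-1,0,-1):
--         if l[i]==-1:
--             if l[i-1]!=0:
--                 l[i-1]=-1
--     return(l)
-- ===== SOURCE B (Python) =====
-- def propagacion(l):
--     # One pass over zero-separated runs: a run of nonzero cells containing a -1
--     # is overwritten wholesale with -1s; zeros and -1-free runs are untouched.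
--     # Mutates l in place (as the original does) and returns the same object.
--     i = 0
--     n = len(l)
--     while i < n:
--         if l[i] == 0:
--             i += 1
--         else:
--             j = i
--             while j < n and l[j] != 0:
--                 j += 1
--             if -1 in l[i:j]:
--                 l[i:j] = [-1] * (j - i)
--             i = j
--     return l
-- ===== Notes on version B (the rewrite author's own statement) =====
-- stated objective: alternative
-- what changed: Replaces A's two full index-based passes (forward then backward -1 propagation) with a single pass over zero-separated runs that rewrites a whole run with -1s iff the run contains a -1.
import Mathlib
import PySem

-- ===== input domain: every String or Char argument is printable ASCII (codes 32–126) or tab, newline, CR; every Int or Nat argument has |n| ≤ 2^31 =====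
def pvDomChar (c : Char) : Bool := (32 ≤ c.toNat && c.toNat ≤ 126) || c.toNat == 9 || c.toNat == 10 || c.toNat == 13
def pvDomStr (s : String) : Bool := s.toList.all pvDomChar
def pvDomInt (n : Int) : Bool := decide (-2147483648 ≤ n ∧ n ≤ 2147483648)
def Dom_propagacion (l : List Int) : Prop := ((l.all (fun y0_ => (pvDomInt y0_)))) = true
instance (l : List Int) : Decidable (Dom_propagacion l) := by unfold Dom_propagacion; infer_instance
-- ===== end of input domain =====

-- B replaces A's two index passes with one pass over zero-separated runs; both Pythons
-- mutate l in place and return it — the equivalence proved here is about the return value.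

-- ===== PORT A =====
-- step of A's forward loop: if l[i]==-1 and l[i+1]!=0 then l[i+1]=-1
def pvStepF (acc : List Int) (i : Int) : List Int :=
  if PySem.List.pyGetD acc i 0 = -1 then
    if PySem.List.pyGetD acc (i + 1) 0 ≠ 0 then PySem.List.pySetD acc (i + 1) (-1) else acc
  else acc

-- step of A's backward loop: if l[i]==-1 and l[i-1]!=0 then l[i-1]=-1
def pvStepB (acc : List Int) (i : Int) : List Int :=
  if PySem.List.pyGetD acc i 0 = -1 then
    if PySem.List.pyGetD acc (i - 1) 0 ≠ 0 then PySem.List.pySetD acc (i - 1) (-1) else acc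
  else acc

def propagacion (l : List Int) : List Int :=
  let l := (PySem.List.pyRange 0 (PySem.List.len l - 1) 1).foldl pvStepF l
  let l := (PySem.List.pyRange (PySem.List.len l - 1) 0 (-1)).foldl pvStepB l
  l

-- ===== PORT B =====
-- one pass over zero-separated runs (Source B): skip zeros; scan a maximal nonzero run;
-- if it contains -1, replace the whole run by -1s
def propagacion_alt (l : List Int) : List Int :=
  match l with
  | [] => []
  | x :: rest =>
    if x = 0 then 0 :: propagacion_alt rest
    else
      let run := x :: rest.takeWhile (· != 0)
      let rest' := rest.dropWhile (· != 0)
      (if (-1 : Int) ∈ run then run.map (fun _ => (-1 : Int)) else run) ++ propagacion_alt rest'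
termination_by l.length
decreasing_by
  · simp
  · simp only [List.length_cons]
    exact Nat.lt_succ_of_le (List.length_dropWhile_le _ _)

-- ===== PRECONDITION & SPEC =====
def Spec_propagacion (l : List Int) (out : List Int) : Prop := out = propagacion_alt l
instance (l : List Int) (out : List Int) : Decidable (Spec_propagacion l out) := by unfold Spec_propagacion; infer_instance

-- ===== CLAIM (what is proved, stated in full; the proofs are below) =====
def Claim_equal_propagacion : Prop := ∀ (l : List Int), Dom_propagacion l → Spec_propagacion l (propagacion l)

-- ===== LEMMAS AND PROOFS =====

-- the value scan underlying A's forward pass: carry the (already updated) previous cell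
def pvFwd (p : Int) : List Int → List Int
  | [] => []
  | y :: r =>
    let y' := if p = -1 ∧ y ≠ 0 then -1 else y
    y' :: pvFwd y' r

def pvF (m : List Int) : List Int :=
  match m with
  | [] => []
  | x :: r => x :: pvFwd x r

def pvTwoPass (l : List Int) : List Int := (pvF ((pvF l).reverse)).reverse

theorem hGet0 (pre suf : List Int) (p d : Int) : (pre ++ p :: suf).getD pre.length d = p := by
  simp [List.getD_eq_getElem?_getD]
theorem hGet1 (pre suf : List Int) (p y d : Int) : (pre ++ p :: y :: suf).getD (pre.length+1) d = y := by
  simp [List.getD_eq_getElem?_getD]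
theorem hSet1 (pre suf : List Int) (p y v : Int) : (pre ++ p :: y :: suf).set (pre.length+1) v = pre ++ p :: v :: suf := by
  induction pre with
  | nil => rfl
  | cons a t ih => simp [ih]

theorem fwd_fold (suf : List Int) : ∀ (pre : List Int) (p : Int),
    (PySem.List.pyRange pre.length (pre.length + suf.length) 1).foldl pvStepF (pre ++ p :: suf)
      = pre ++ p :: pvFwd p suf := by
  induction suf with
  | nil => intro pre p; simp [PySem.List.pyRange_one_eq_nil, pvFwd]
  | cons y s ih =>
    intro pre p
    have hcons : PySem.List.pyRange (pre.length) (pre.length + (y :: s).length) 1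
        = (pre.length : Int) :: PySem.List.pyRange ((pre.length : Int) + 1) (pre.length + (y :: s).length) 1 := by
      apply PySem.List.pyRange_one_cons; simp
    rw [hcons]
    simp only [List.foldl_cons]
    have hstep : pvStepF (pre ++ p :: y :: s) (pre.length) =
        pre ++ p :: (if p = -1 ∧ y ≠ 0 then -1 else y) :: s := by
      unfold pvStepF
      have g0 : PySem.List.pyGetD (pre ++ p :: y :: s) (pre.length) 0 = p := by
        rw [PySem.List.pyGetD_natCast]; exact hGet0 _ _ _ _
      have g1 : PySem.List.pyGetD (pre ++ p :: y :: s) ((pre.length : Int) + 1) 0 = y := by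
        have : ((pre.length : Int) + 1) = ((pre.length + 1 : Nat) : Int) := by push_cast; ring
        rw [this, PySem.List.pyGetD_natCast]; exact hGet1 _ _ _ _ _
      have s1 : PySem.List.pySetD (pre ++ p :: y :: s) ((pre.length : Int) + 1) (-1) = pre ++ p :: (-1) :: s := by
        have : ((pre.length : Int) + 1) = ((pre.length + 1 : Nat) : Int) := by push_cast; ring
        rw [this, PySem.List.pySetD_natCast]; exact hSet1 _ _ _ _ _
      rw [g0, g1, s1]
      by_cases hp : p = -1 <;> by_cases hy : y = 0 <;> simp [hp, hy]
    rw [hstep]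
    set y' := if p = -1 ∧ y ≠ 0 then -1 else y with hy'
    have hre : pre ++ p :: y' :: s = (pre ++ [p]) ++ y' :: s := by simp
    have hlen : ((pre.length : Int) + 1) = ((pre ++ [p]).length : Int) := by simp
    have hlen2 : ((pre.length : Int) + (y :: s).length) = ((pre ++ [p]).length : Int) + s.length := by
      simp; ring
    rw [hre, hlen, hlen2, ih (pre ++ [p]) y']
    simp only [pvFwd]
    rw [hy']; simp

theorem hSet0 (pre suf : List Int) (p v : Int) : (pre ++ p :: suf).set pre.length v = pre ++ v :: suf := by
  induction pre with
  | nil => rfl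
  | cons a t ih => simp [ih]

theorem bwd_fold (rfront : List Int) : ∀ (tail : List Int) (p : Int),
    (PySem.List.pyRange rfront.length 0 (-1)).foldl pvStepB (rfront.reverse ++ p :: tail)
      = (pvFwd p rfront).reverse ++ p :: tail := by
  induction rfront with
  | nil => intro tail p; simp [PySem.List.pyRange_neg_one_eq_nil, pvFwd]
  | cons q rf ih =>
    intro tail p
    have hcons : PySem.List.pyRange ((q :: rf).length) 0 (-1)
        = ((q :: rf).length : Int) :: PySem.List.pyRange (((q :: rf).length : Int) - 1) 0 (-1) := by
      apply PySem.List.pyRange_neg_one_cons; simp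
    rw [hcons]
    simp only [List.foldl_cons]
    have hre : (q :: rf).reverse ++ p :: tail = rf.reverse ++ q :: p :: tail := by simp
    have hlen : (((q :: rf).length : Int) - 1) = (rf.length : Int) := by simp
    have hstep : pvStepB (rf.reverse ++ q :: p :: tail) ((q :: rf).length) =
        rf.reverse ++ (if p = -1 ∧ q ≠ 0 then -1 else q) :: p :: tail := by
      unfold pvStepB
      have g0 : PySem.List.pyGetD (rf.reverse ++ q :: p :: tail) ((q :: rf).length : Int) 0 = p := by
        have : (((q :: rf).length : Nat) : Int) = ((rf.reverse.length + 1 : Nat) : Int) := by simp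
        rw [this, PySem.List.pyGetD_natCast]
        exact hGet1 _ _ _ _ _
      have g1 : PySem.List.pyGetD (rf.reverse ++ q :: p :: tail) (((q :: rf).length : Int) - 1) 0 = q := by
        have : (((q :: rf).length : Int) - 1) = ((rf.reverse.length : Nat) : Int) := by simp
        rw [this, PySem.List.pyGetD_natCast]
        exact hGet0 _ _ _ _
      have s1 : PySem.List.pySetD (rf.reverse ++ q :: p :: tail) (((q :: rf).length : Int) - 1) (-1)
          = rf.reverse ++ (-1) :: p :: tail := by
        have : (((q :: rf).length : Int) - 1) = ((rf.reverse.length : Nat) : Int) := by simp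
        rw [this, PySem.List.pySetD_natCast]
        exact hSet0 _ _ _ _
      rw [g0, g1, s1]
      by_cases hp : p = -1 <;> by_cases hq : q = 0 <;> simp [hp, hq]
    rw [hre, hstep, hlen]
    set q' := if p = -1 ∧ q ≠ 0 then -1 else q with hq'
    rw [ih (p :: tail) q']
    simp only [pvFwd]
    rw [hq']
    simp

theorem fwd_length (p : Int) (r : List Int) : (pvFwd p r).length = r.length := by
  induction r generalizing p with
  | nil => rfl
  | cons y s ih => simp [pvFwd, ih]

theorem F_length (m : List Int) : (pvF m).length = m.length := by
  cases m with
  | nil => rfl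
  | cons x r => simp [pvF, fwd_length]

theorem propagacion_eq_twoPass (l : List Int) : propagacion l = pvTwoPass l := by
  cases l with
  | nil =>
    unfold propagacion pvTwoPass
    simp [PySem.List.pyRange_one_eq_nil, PySem.List.pyRange_neg_one_eq_nil, pvF]
  | cons x rest =>
    unfold propagacion
    have h1 : (PySem.List.pyRange 0 (PySem.List.len (x :: rest) - 1) 1).foldl pvStepF (x :: rest)
        = pvF (x :: rest) := by
      have e : PySem.List.len (x :: rest) - 1 = ((([] : List Int).length : Int) + rest.length) := by
        simp
      rw [e]
      have : (0 : Int) = (([] : List Int).length : Int) := by simp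
      rw [this]
      exact fwd_fold rest [] x
    rw [h1]
    -- backward pass on m := pvF (x :: rest), a nonempty list
    set m := pvF (x :: rest) with hm
    have hmne : m ≠ [] := by rw [hm]; simp [pvF]
    obtain ⟨p, rf, hrev⟩ : ∃ p rf, m.reverse = p :: rf := by
      cases hr : m.reverse with
      | nil => exact absurd (by simpa using congrArg List.reverse hr) hmne
      | cons a b => exact ⟨a, b, rfl⟩
    have hmrep : m = rf.reverse ++ p :: [] := by
      have := congrArg List.reverse hrev
      simpa using this
    have hlenm : PySem.List.len m - 1 = ((rf.length : Nat) : Int) := by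
      have : m.length = rf.length + 1 := by
        rw [hmrep]; simp
      simp [this]
    show (PySem.List.pyRange (PySem.List.len m - 1) 0 (-1)).foldl pvStepB m = pvTwoPass (x :: rest)
    rw [hlenm, hmrep, bwd_fold rf [] p]
    unfold pvTwoPass
    rw [← hm, hrev]
    simp [pvF]

theorem fwd_zero_eq_F (t : List Int) : pvFwd 0 t = pvF t := by
  cases t with
  | nil => rfl
  | cons y s => simp [pvFwd, pvF]

theorem fwd_append_zero (u : List Int) : ∀ (p : Int) (t : List Int),
    pvFwd p (u ++ 0 :: t) = pvFwd p u ++ 0 :: pvF t := by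
  induction u with
  | nil => intro p t; simp [pvFwd, fwd_zero_eq_F]
  | cons y s ih => intro p t; simp [pvFwd, ih]

theorem F_split (u t : List Int) : pvF (u ++ 0 :: t) = pvF u ++ 0 :: pvF t := by
  cases u with
  | nil => simp [pvF, fwd_zero_eq_F]
  | cons x s => simp [pvF, fwd_append_zero]

theorem fwd_id (r : List Int) : ∀ p : Int, p ≠ -1 → (-1 : Int) ∉ r → pvFwd p r = r := by
  induction r with
  | nil => intro p _ _; rfl
  | cons y s ih =>
    intro p hp hm
    simp only [List.mem_cons, not_or] at hm
    simp [pvFwd, hp, ih y (fun h => hm.1 h.symm) hm.2]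
theorem F_id (m : List Int) (hm : (-1 : Int) ∉ m) : pvF m = m := by
  cases m with
  | nil => rfl
  | cons x r =>
    simp only [List.mem_cons, not_or] at hm
    simp [pvF, fwd_id r x (fun h => hm.1 h.symm) hm.2]

theorem fwd_neg_all (r : List Int) (h : ∀ y ∈ r, y ≠ 0) :
    pvFwd (-1) r = r.map (fun _ => (-1 : Int)) := by
  induction r with
  | nil => rfl
  | cons y s ih =>
    simp [pvFwd, h y (by simp)]
    simpa using ih (fun z hz => h z (by simp [hz]))

theorem fwd_run (u : List Int) : ∀ (p : Int) (v : List Int), p ≠ -1 → (-1 : Int) ∉ u →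
    (∀ y ∈ v, y ≠ 0) →
    pvFwd p (u ++ -1 :: v) = u ++ -1 :: v.map (fun _ => (-1 : Int)) := by
  induction u with
  | nil =>
    intro p v hp _ hv
    simp [pvFwd, hp, fwd_neg_all v hv]
  | cons y s ih =>
    intro p v hp hu hv
    simp only [List.mem_cons, not_or] at hu
    simp [pvFwd, hp, ih y v (fun h => hu.1 h.symm) hu.2 hv]

theorem exists_first_split (r : List Int) (h : (-1 : Int) ∈ r) :
    ∃ u v, r = u ++ -1 :: v ∧ (-1 : Int) ∉ u := by
  induction r with
  | nil => simp at h
  | cons y s ih =>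
    by_cases hy : y = -1
    · exact ⟨[], s, by simp [hy], by simp⟩
    · have hs : (-1 : Int) ∈ s := by
        rcases List.mem_cons.1 h with h1 | h2
        · exact absurd h1.symm hy
        · exact h2
      obtain ⟨u, v, hr, hu⟩ := ih hs
      exact ⟨y :: u, v, by simp [hr], by simp [hu]; exact fun h => hy h.symm⟩

theorem map_const_eq (xs ys : List Int) (h : xs.length = ys.length) :
    xs.map (fun _ => (-1 : Int)) = ys.map (fun _ => (-1 : Int)) := by
  simp [List.map_const', h]

theorem twoPass_run (run : List Int) (hz : ∀ y ∈ run, y ≠ 0) :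
    pvTwoPass run = if (-1 : Int) ∈ run then run.map (fun _ => (-1 : Int)) else run := by
  by_cases hm : (-1 : Int) ∈ run
  · simp only [hm, if_pos]
    obtain ⟨u, v, hr, hu⟩ := exists_first_split run hm
    have hvz : ∀ y ∈ v, y ≠ 0 := fun y hy => hz y (by simp [hr, hy])
    have hF : pvF run = u ++ -1 :: v.map (fun _ => (-1 : Int)) := by
      cases u with
      | nil =>
        simp only [hr]
        simp [pvF, fwd_neg_all v hvz]
      | cons x u' =>
        have hx : x ≠ -1 := fun h => hu (by simp [h])
        have hu' : (-1 : Int) ∉ u' := fun h => hu (by simp [h])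
        simp only [hr]
        simp [pvF, fwd_run u' x v hx hu' hvz]
    -- second pass turns everything to -1
    have hall : ∀ y ∈ (pvF run).reverse, y ≠ 0 := by
      intro y hy
      rw [List.mem_reverse, hF] at hy
      rcases List.mem_append.1 hy with hy | hy
      · exact hz y (by rw [hr]; exact List.mem_append.2 (Or.inl hy))
      · rcases List.mem_cons.1 hy with hy | hy
        · simp [hy]
        · obtain ⟨z, _, hz'⟩ := List.mem_map.1 hy
          simp [← hz']
    have hrev2 : (pvF run).reverse = (v.map (fun _ => (-1 : Int))).reverse ++ -1 :: u.reverse := by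
      rw [hF]; simp
    have hF2 : pvF ((pvF run).reverse) = ((pvF run).reverse).map (fun _ => (-1 : Int)) := by
      cases hc : (pvF run).reverse with
      | nil => rfl
      | cons a b =>
        have ha' : a = -1 := by
          cases hw : (v.map (fun _ => (-1 : Int))).reverse with
          | nil =>
            rw [hrev2, hw] at hc
            simp at hc
            exact hc.1.symm
          | cons c cs =>
            rw [hrev2, hw] at hc
            simp at hc
            have hcm : c ∈ (v.map (fun _ => (-1 : Int))).reverse := by rw [hw]; simp
            obtain ⟨z, _, hz'⟩ := List.mem_map.1 (List.mem_reverse.1 hcm)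
            rw [← hc.1, ← hz']
        have hbz : ∀ y ∈ b, y ≠ 0 := by
          intro y hy; exact hall y (by rw [hc]; simp [hy])
        simp [pvF, ha', fwd_neg_all b hbz]
    unfold pvTwoPass
    rw [hF2]
    rw [List.map_reverse, List.reverse_reverse]
    apply map_const_eq
    exact F_length run
  · rw [if_neg hm]
    have h1 : pvF run = run := F_id run hm
    have h2 : (-1 : Int) ∉ run.reverse := by simpa using hm
    unfold pvTwoPass
    rw [h1, F_id _ h2, List.reverse_reverse]

theorem twoPass_split (u t : List Int) :
    pvTwoPass (u ++ 0 :: t) = pvTwoPass u ++ 0 :: pvTwoPass t := by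
  unfold pvTwoPass
  rw [F_split u t]
  have h : (pvF u ++ 0 :: pvF t).reverse = (pvF t).reverse ++ 0 :: (pvF u).reverse := by simp
  rw [h, F_split]
  simp

theorem dropWhile_head_zero (rest : List Int) (z : Int) (t : List Int)
    (h : rest.dropWhile (· != 0) = z :: t) : z = 0 := by
  induction rest with
  | nil => simp at h
  | cons a r ih =>
    rw [List.dropWhile_cons] at h
    by_cases ha : a = 0
    · simp [ha] at h; omega
    · simp [ha] at h; exact ih h

theorem alt_nil : propagacion_alt [] = [] := by rw [propagacion_alt.eq_def]

theorem alt_cons (x : Int) (rest : List Int) : propagacion_alt (x :: rest) =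
    if x = 0 then 0 :: propagacion_alt rest
    else
      (if (-1 : Int) ∈ x :: rest.takeWhile (· != 0)
        then (x :: rest.takeWhile (· != 0)).map (fun _ => (-1 : Int))
        else x :: rest.takeWhile (· != 0)) ++ propagacion_alt (rest.dropWhile (· != 0)) := by
  rw [propagacion_alt.eq_def]

theorem twoPass_nil : pvTwoPass [] = [] := rfl

theorem twoPass_eq_alt_aux (n : Nat) : ∀ l : List Int, l.length ≤ n → pvTwoPass l = propagacion_alt l := by
  induction n with
  | zero =>
    intro l hl
    have : l = [] := List.eq_nil_of_length_eq_zero (Nat.le_zero.1 hl)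
    subst this
    rw [twoPass_nil, alt_nil]
  | succ n ih =>
    intro l hl
    cases l with
    | nil => rw [twoPass_nil, alt_nil]
    | cons x rest =>
      by_cases hx : x = 0
      · subst hx
        have h := twoPass_split [] rest
        simp only [List.nil_append] at h
        rw [h]
        rw [alt_cons]
        simp [twoPass_nil, ih rest (by simpa using hl)]
      · rw [alt_cons, if_neg hx]
        have hdec : x :: rest = (x :: rest.takeWhile (· != 0)) ++ rest.dropWhile (· != 0) := by
          simp [List.takeWhile_append_dropWhile]
        have hruneq : ∀ y ∈ x :: rest.takeWhile (· != 0), y ≠ 0 := by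
          intro y hy
          rcases List.mem_cons.1 hy with hy | hy
          · simpa [hy] using hx
          · have := List.mem_takeWhile_imp hy
            simpa using this
        cases hdw : rest.dropWhile (· != 0) with
        | nil =>
          have hrun : x :: rest = x :: rest.takeWhile (· != 0) := by
            conv_lhs => rw [hdec]
            rw [hdw]; simp
          rw [← hrun] at hruneq ⊢
          rw [twoPass_run _ hruneq]
          simp [alt_nil]
        | cons z t =>
          have hz0 : z = 0 := dropWhile_head_zero rest z t hdw
          subst hz0
          have hrw : x :: rest = (x :: rest.takeWhile (· != 0)) ++ 0 :: t := by
            conv_lhs => rw [hdec, hdw]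
          rw [hrw, twoPass_split, twoPass_run _ hruneq]
          have ht : pvTwoPass t = propagacion_alt t := by
            apply ih
            have : t.length < rest.length + 1 := by
              have h1 : (rest.dropWhile (· != 0)).length ≤ rest.length := List.length_dropWhile_le _ _
              rw [hdw] at h1; simp at h1; omega
            simp only [List.length_cons] at hl
            omega
          rw [alt_cons]
          simp [ht]

theorem twoPass_eq_alt (l : List Int) : pvTwoPass l = propagacion_alt l :=
  twoPass_eq_alt_aux l.length l (le_refl _)

-- ===== VERDICT (by name: the statement is the Claim_ definition above) =====
theorem propagacion_spec : Claim_equal_propagacion := by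
  intro l _
  unfold Spec_propagacion
  rw [propagacion_eq_twoPass, twoPass_eq_alt]
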